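-- pv_equiv track=rewrite | github.com/BigBaz54/advent_of_code_2023 | python/day14/puzzle1/total_load.py | total_load
-- ===== SOURCE A (Python) =====
-- def total_load(map_lines):
--     last_stop_i = [-1 for _ in range(len(map_lines[0]))]
--     total_load = 0
--     for i, line in enumerate(map_lines):
--         for j, char in enumerate(line):
--             if char == 'O':
--                 # A rounded rock that will roll until it's stoppped
--                 i_after_roll = last_stop_i[j] + 1
--                 total_load += len(map_lines) - i_after_roll
--                 last_stop_i[j] = i_after_roll
--             elif char == '#':
--                 # A cube rock that will not roll
--                 last_stop_i[j] = i
--     return total_load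
-- ===== SOURCE B (Python) =====
-- def total_load(map_lines):
--     n = len(map_lines)
--     width = len(map_lines[0])
--     return sum(_col_load(map_lines, j, n) for j in range(width))
--
--
-- def _col_load(map_lines, j, n):
--     # Column-major: split column j into '#'-delimited segments; a segment whose
--     # free space starts at row `base` and holds k rounded rocks contributes the
--     # closed-form load k*n - k*base - k*(k-1)//2 (rocks settle on rows base..base+k-1).
--     load = 0
--     base = 0
--     k = 0
--     for i, line in enumerate(map_lines):
--         if j < len(line):
--             c = line[j]
--             if c == 'O':
--                 k += 1
--             elif c == '#':
--                 load += k * n - k * base - k * (k - 1) // 2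
--                 base = i + 1
--                 k = 0
--     return load + k * n - k * base - k * (k - 1) // 2
-- ===== Notes on version B (the rewrite author's own statement) =====
-- stated objective: alternative
-- what changed: B computes the load column by column: each column is split at '#' into segments and each segment's load is a closed-form triangular sum k*n - k*base - k*(k-1)//2, replacing A's row-major scan that maintains a per-column last-stop array and accumulates a per-rock load for every 'O'.
import Mathlib
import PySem

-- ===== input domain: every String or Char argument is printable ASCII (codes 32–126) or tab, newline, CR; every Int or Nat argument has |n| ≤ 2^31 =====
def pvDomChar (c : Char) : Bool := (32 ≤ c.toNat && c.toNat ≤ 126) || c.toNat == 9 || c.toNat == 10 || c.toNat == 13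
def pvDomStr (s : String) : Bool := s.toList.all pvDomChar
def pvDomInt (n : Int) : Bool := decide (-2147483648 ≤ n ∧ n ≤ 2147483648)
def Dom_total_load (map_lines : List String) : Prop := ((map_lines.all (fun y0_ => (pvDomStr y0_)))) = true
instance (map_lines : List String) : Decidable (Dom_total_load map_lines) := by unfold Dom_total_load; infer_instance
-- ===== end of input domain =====

-- B recomputes the load column by column: each column is split at '#' into segments and a
-- closed-form triangular sum gives the segment's load, instead of A's row-major scan that
-- rolls each rock and accumulates per-rock loads — an alternative decomposition, same cost.


-- ===== PORT A =====
-- inner loop of A: for j, char in enumerate(line) over state (last_stop_i, total_load)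
def tlA_row (n : Int) (i : Nat) : Nat → List Char → List Int × Int → List Int × Int
  | _, [], st => st
  | j, c :: cs, (ls, t) =>
    if c = 'O' then
      -- i_after_roll = last_stop_i[j] + 1 (in-range under Pre_; default irrelevant there)
      let ia := ls.getD j (-1) + 1
      tlA_row n i (j + 1) cs (ls.set j ia, t + ((n : Int) - ia))
    else if c = '#' then
      tlA_row n i (j + 1) cs (ls.set j (i : Int), t)
    else
      tlA_row n i (j + 1) cs (ls, t)

-- outer loop of A: for i, line in enumerate(map_lines)
def tlA_rows (n : Int) : Nat → List String → List Int × Int → List Int × Int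
  | _, [], st => st
  | i, line :: rest, st => tlA_rows n (i + 1) rest (tlA_row n i 0 line.toList st)

def total_load (map_lines : List String) : Int :=
  -- last_stop_i = [-1]*len(map_lines[0]); empty input raises in Python (outside Pre_)
  let ls0 : List Int := List.replicate (map_lines.headD "").length (-1)
  (tlA_rows (map_lines.length : Int) 0 map_lines (ls0, 0)).2

-- ===== PORT B =====
-- _col_load's loop: for i, line in enumerate(map_lines) over state (load, base, k)
def tlB_colLoop (n : Int) (j : Nat) : Nat → List String → Int × Int × Int → Int × Int × Int
  | _, [], st => st
  | i, line :: rest, (load, base, k) =>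
    match line.toList[j]? with            -- "if j < len(line): c = line[j]"
    | none => tlB_colLoop n j (i + 1) rest (load, base, k)
    | some c =>
      if c = 'O' then tlB_colLoop n j (i + 1) rest (load, base, k + 1)
      else if c = '#' then
        tlB_colLoop n j (i + 1) rest
          (load + k * n - k * base - PySem.Int.floordiv (k * (k - 1)) 2, (i : Int) + 1, 0)
      else tlB_colLoop n j (i + 1) rest (load, base, k)

-- _col_load(map_lines, j, n)
def tlB_col (map_lines : List String) (j : Nat) (n : Int) : Int :=
  match tlB_colLoop n j 0 map_lines (0, 0, 0) with
  | (load, base, k) => load + k * n - k * base - PySem.Int.floordiv (k * (k - 1)) 2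

def total_load_alt (map_lines : List String) : Int :=
  let n : Int := map_lines.length
  let width := (map_lines.headD "").length   -- len(map_lines[0]); empty input raises (outside Pre_)
  ((List.range width).map (fun j => tlB_col map_lines j n)).sum

-- ===== PRECONDITION & SPEC =====
-- Pre_ excludes exactly the inputs on which the Python A raises IndexError: the empty list
-- (map_lines[0]) and any 'O'/'#' at a column index ≥ len(map_lines[0]) (last_stop_i[j]).
def Pre_total_load (map_lines : List String) : Prop :=
  map_lines ≠ [] ∧
    ∀ line ∈ map_lines, ∀ k < line.toList.length,
      (line.toList.getD k '.' = 'O' ∨ line.toList.getD k '.' = '#') →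
        k < (map_lines.headD "").length

instance (map_lines : List String) : Decidable (Pre_total_load map_lines) := by
  unfold Pre_total_load; infer_instance

def pvWitness_total_load : List String := ["O.#", "..O", "O#O"]

def Spec_total_load (map_lines : List String) (out : Int) : Prop := out = total_load_alt map_lines
instance (map_lines : List String) (out : Int) : Decidable (Spec_total_load map_lines out) := by unfold Spec_total_load; infer_instance

-- ===== CLAIM (what is proved, stated in full; the proofs are below) =====
def Claim_equal_total_load : Prop := ∀ (map_lines : List String), Dom_total_load map_lines → Pre_total_load map_lines → Spec_total_load map_lines (total_load map_lines)

-- ===== LEMMAS AND PROOFS =====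

-- per-character gain and last-stop transition, shared by both characterisations
def pvGain (n s : Int) (c : Char) : Int := if c = 'O' then n - (s + 1) else 0
def pvStep (i : Nat) (s : Int) (c : Char) : Int :=
  if c = 'O' then s + 1 else if c = '#' then (i : Int) else s

-- the effect of A's inner row loop on last_stop_i, and the load it adds
def pvRowApply (i : Nat) : Nat → List Char → List Int → List Int
  | _, [], ls => ls
  | j, c :: cs, ls =>
    if c = 'O' then pvRowApply i (j + 1) cs (ls.set j (ls.getD j (-1) + 1))
    else if c = '#' then pvRowApply i (j + 1) cs (ls.set j (i : Int))
    else pvRowApply i (j + 1) cs ls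

def pvRowGain (n : Int) (i : Nat) : Nat → List Char → List Int → Int
  | _, [], _ => 0
  | j, c :: cs, ls =>
    if c = 'O' then (n - (ls.getD j (-1) + 1)) + pvRowGain n i (j + 1) cs (ls.set j (ls.getD j (-1) + 1))
    else if c = '#' then pvRowGain n i (j + 1) cs (ls.set j (i : Int))
    else pvRowGain n i (j + 1) cs ls

-- column j of the grid, rows numbered from i; missing cells read as the no-op '.'
def pvCol (j : Nat) : Nat → List String → List (Nat × Char)
  | _, [] => []
  | i, line :: rest => (i, line.toList.getD j '.') :: pvCol j (i + 1) rest

-- reference column scan: last stop s and accumulated load t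
def pvColA (n : Int) : Int × Int → List (Nat × Char) → Int × Int
  | st, [] => st
  | (s, t), (i, c) :: es =>
    if c = 'O' then pvColA n (s + 1, t + (n - (s + 1))) es
    else if c = '#' then pvColA n ((i : Int), t) es
    else pvColA n (s, t) es

def pvColT (n s : Int) (es : List (Nat × Char)) : Int := (pvColA n (s, 0) es).2

def pvSeg (n base k : Int) : Int := k * n - k * base - PySem.Int.floordiv (k * (k - 1)) 2
def pvFin (n : Int) (st : Int × Int × Int) : Int := st.1 + pvSeg n st.2.1 st.2.2

theorem pv_getD_set_ne (l : List Int) (j m : Nat) (v : Int) (h : j ≠ m) :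
    (l.set j v).getD m (-1) = l.getD m (-1) := by
  simp [List.getD_eq_getElem?_getD, List.getElem?_set_ne h]

theorem pv_getD_set_self (l : List Int) (j : Nat) (v : Int) (h : j < l.length) :
    (l.set j v).getD j (-1) = v := by
  simp [List.getD_eq_getElem?_getD, h]

theorem pvSeg_succ (n base k : Int) : pvSeg n base (k + 1) = pvSeg n base k + (n - base - k) := by
  unfold pvSeg
  rw [PySem.Int.floordiv_eq_ediv_of_pos (by norm_num), PySem.Int.floordiv_eq_ediv_of_pos (by norm_num)]
  have h : (k + 1) * ((k + 1) - 1) = k * (k - 1) + k * 2 := by ring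
  rw [h, Int.add_mul_ediv_right _ _ (by norm_num : (2 : Int) ≠ 0)]
  ring

theorem pvSeg_zero (n base : Int) : pvSeg n base 0 = 0 := by
  unfold pvSeg
  norm_num [PySem.Int.floordiv_eq_ediv_of_pos (by norm_num : (0:Int) < 2)]

-- A's inner loop splits into its state effect and its load gain
theorem tlA_row_split (n : Int) (i : Nat) (cs : List Char) :
    ∀ (j : Nat) (ls : List Int) (t : Int),
      tlA_row n i j cs (ls, t) = (pvRowApply i j cs ls, t + pvRowGain n i j cs ls) := by
  induction cs with
  | nil => intro j ls t; simp [tlA_row, pvRowApply, pvRowGain]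
  | cons c cs ih =>
    intro j ls t
    simp only [tlA_row, pvRowApply, pvRowGain]
    split_ifs with hO hH
    · rw [ih]; congr 1; ring
    · rw [ih]
    · rw [ih]

theorem pvRowApply_length (i : Nat) (cs : List Char) :
    ∀ (j : Nat) (ls : List Int), (pvRowApply i j cs ls).length = ls.length := by
  induction cs with
  | nil => intro j ls; simp [pvRowApply]
  | cons c cs ih =>
    intro j ls
    unfold pvRowApply
    split_ifs <;> rw [ih] <;> simp

-- indices below the cursor are untouched
theorem pvRowApply_getD_lt (i : Nat) (cs : List Char) :
    ∀ (j : Nat) (ls : List Int) (m : Nat), m < j →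
      (pvRowApply i j cs ls).getD m (-1) = ls.getD m (-1) := by
  induction cs with
  | nil => intro j ls m _; simp [pvRowApply]
  | cons c cs ih =>
    intro j ls m hm
    unfold pvRowApply
    split_ifs <;> rw [ih _ _ _ (by omega)] <;>
      try rw [pv_getD_set_ne _ _ _ _ (by omega)]

-- the state effect at an in-range index is exactly pvStep on the row's character there
theorem pvRowApply_getD (i : Nat) (cs : List Char) :
    ∀ (j : Nat) (ls : List Int) (m : Nat), j ≤ m → m < ls.length →
      (pvRowApply i j cs ls).getD m (-1) = pvStep i (ls.getD m (-1)) (cs.getD (m - j) '.') := by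
  induction cs with
  | nil =>
    intro j ls m _ _
    simp [pvRowApply, pvStep, List.getD]
  | cons c cs ih =>
    intro j ls m hjm hm
    rcases Nat.eq_or_lt_of_le hjm with heq | hlt
    · subst heq
      unfold pvRowApply
      have hd0 : (c :: cs).getD (j - j) '.' = c := by simp
      rw [hd0]
      split_ifs with hO hH
      · rw [pvRowApply_getD_lt i cs _ _ _ (by omega), pv_getD_set_self _ _ _ hm,
          pvStep, if_pos hO]
      · rw [pvRowApply_getD_lt i cs _ _ _ (by omega), pv_getD_set_self _ _ _ hm,
          pvStep, if_neg hO, if_pos hH]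
      · rw [pvRowApply_getD_lt i cs _ _ _ (by omega), pvStep, if_neg hO, if_neg hH]
    · have hd : (c :: cs).getD (m - j) '.' = cs.getD (m - (j + 1)) '.' := by
        have : m - j = (m - (j + 1)) + 1 := by omega
        simp [this]
      unfold pvRowApply
      split_ifs <;>
        rw [ih (j + 1) _ m (by omega) (by simpa using hm), hd] <;>
        try rw [pv_getD_set_ne _ _ _ _ (by omega)]

-- the load a row adds, as a sum of per-column gains over the row's own length
theorem pvRowGain_eq (n : Int) (i : Nat) (cs : List Char) :
    ∀ (j : Nat) (ls : List Int),
      pvRowGain n i j cs ls =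
        ((List.range cs.length).map
          (fun k => pvGain n (ls.getD (j + k) (-1)) (cs.getD k '.'))).sum := by
  induction cs with
  | nil => intro j ls; simp [pvRowGain]
  | cons c cs ih =>
    intro j ls
    have hrange : List.range (cs.length + 1) = 0 :: (List.range cs.length).map Nat.succ :=
      List.range_succ_eq_map
    have hmapcongr : ∀ (ls' : List Int), (∀ m, j ≠ m → ls'.getD m (-1) = ls.getD m (-1)) →
        ((List.range cs.length).map
          (fun k => pvGain n (ls'.getD (j + 1 + k) (-1)) (cs.getD k '.'))).sum =
        ((List.range cs.length).map
          (fun k => pvGain n (ls.getD (j + 1 + k) (-1)) (cs.getD k '.'))).sum := by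
      intro ls' h
      congr 1
      apply List.map_congr_left
      intro k _
      rw [h (j + 1 + k) (by omega)]
    have hshift : ((List.range cs.length).map Nat.succ).map
          (fun k => pvGain n (ls.getD (j + k) (-1)) ((c :: cs).getD k '.')) =
        (List.range cs.length).map
          (fun k => pvGain n (ls.getD (j + 1 + k) (-1)) (cs.getD k '.')) := by
      rw [List.map_map]
      apply List.map_congr_left
      intro k _
      have h1 : j + Nat.succ k = j + 1 + k := by omega
      simp [Function.comp, h1]
    unfold pvRowGain
    split_ifs with hO hH
    · rw [ih, hmapcongr _ (fun m hm => pv_getD_set_ne _ _ _ _ hm)]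
      simp only [List.length_cons, hrange, List.map_cons, List.sum_cons, hshift]
      simp [pvGain, hO]
    · rw [ih, hmapcongr _ (fun m hm => pv_getD_set_ne _ _ _ _ hm)]
      simp only [List.length_cons, hrange, List.map_cons, List.sum_cons, hshift]
      simp [pvGain, hH]
    · rw [ih]
      simp only [List.length_cons, hrange, List.map_cons, List.sum_cons, hshift]
      simp [pvGain, hO]

-- extend/shrink a range-indexed sum across vanishing terms
theorem pv_sum_range_ext (f : Nat → Int) (a : Nat) :
    ∀ (b : Nat), a ≤ b → (∀ k, a ≤ k → k < b → f k = 0) →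
      ((List.range b).map f).sum = ((List.range a).map f).sum := by
  intro b
  induction b with
  | zero =>
    intro h _
    have ha : a = 0 := by omega
    subst ha
    rfl
  | succ b ih =>
    intro hab hz
    rcases Nat.eq_or_lt_of_le hab with heq | hlt
    · rw [heq]
    · rw [List.range_succ, List.map_append, List.sum_append,
        ih (by omega) (fun k hk hk' => hz k hk (by omega))]
      simp [hz b (by omega) (by omega)]

theorem pvColA_snd (n : Int) (es : List (Nat × Char)) :
    ∀ (s t : Int), (pvColA n (s, t) es).2 = t + pvColT n s es := by
  induction es with
  | nil => intro s t; simp [pvColA, pvColT]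
  | cons e es ih =>
    intro s t
    obtain ⟨i, c⟩ := e
    simp only [pvColA, pvColT]
    split_ifs with hO hH
    · rw [ih, ih (s + 1) (0 + (n - (s + 1)))]; ring
    · rw [ih, ih ((i : Int)) 0]; ring
    · rw [ih, ih s 0]; ring

theorem pvColT_cons (n s : Int) (i : Nat) (c : Char) (es : List (Nat × Char)) :
    pvColT n s ((i, c) :: es) = pvGain n s c + pvColT n (pvStep i s c) es := by
  unfold pvColT pvGain pvStep
  simp only [pvColA]
  split_ifs with hO hH <;> simp only [pvColA_snd] <;> ring

-- A's whole run, characterised column by column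
theorem tlA_char (n : Int) (lines : List String) :
    ∀ (i : Nat) (ls : List Int) (t : Int),
      (∀ line ∈ lines, ∀ k, ls.length ≤ k → line.toList.getD k '.' ≠ 'O') →
      (tlA_rows n i lines (ls, t)).2 =
        t + ((List.range ls.length).map
              (fun j => pvColT n (ls.getD j (-1)) (pvCol j i lines))).sum := by
  induction lines with
  | nil => intro i ls t _; simp [tlA_rows, pvCol, pvColT, pvColA]
  | cons line rest ih =>
    intro i ls t hH
    have hlen := pvRowApply_length i line.toList 0 ls
    simp only [tlA_rows]
    rw [tlA_row_split, ih (i + 1) _ _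
      (fun l hl k hk => hH l (List.mem_cons_of_mem _ hl) k (by omega))]
    rw [hlen]
    -- per-column: peel this row's entry off each column
    have hcols : ∀ j, j < ls.length →
        pvColT n (ls.getD j (-1)) (pvCol j i (line :: rest)) =
          pvGain n (ls.getD j (-1)) (line.toList.getD j '.') +
          pvColT n ((pvRowApply i 0 line.toList ls).getD j (-1)) (pvCol j (i + 1) rest) := by
      intro j hj
      rw [pvRowApply_getD i line.toList 0 ls j (Nat.zero_le j) hj]
      simp only [Nat.sub_zero]
      exact pvColT_cons n _ i _ _
    have hsum : ((List.range ls.length).map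
          (fun j => pvColT n (ls.getD j (-1)) (pvCol j i (line :: rest)))).sum =
        ((List.range ls.length).map
          (fun j => pvGain n (ls.getD j (-1)) (line.toList.getD j '.'))).sum +
        ((List.range ls.length).map
          (fun j => pvColT n ((pvRowApply i 0 line.toList ls).getD j (-1))
            (pvCol j (i + 1) rest))).sum := by
      rw [← PySem.List.sum_map_add_int]
      congr 1
      apply List.map_congr_left
      intro j hj
      exact hcols j (List.mem_range.mp hj)
    rw [hsum]
    -- this row's gain equals the per-column gain sum
    have hgain : pvRowGain n i 0 line.toList ls =
        ((List.range ls.length).map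
          (fun j => pvGain n (ls.getD j (-1)) (line.toList.getD j '.'))).sum := by
      rw [pvRowGain_eq]
      simp only [Nat.zero_add]
      rcases Nat.le_total line.toList.length ls.length with hle | hle
      · rw [pv_sum_range_ext _ line.toList.length ls.length hle]
        intro k hk _
        have hdot : line.toList.getD k '.' = '.' := List.getD_eq_default _ _ hk
        simp only [pvGain, hdot]
        rw [if_neg (by decide)]
      · rw [pv_sum_range_ext _ ls.length line.toList.length hle]
        intro k hk _
        have hne := hH line (by simp) k hk
        simp only [pvGain]
        rw [if_neg hne]
    rw [hgain]; ring

-- B's per-column loop, characterised against the reference column scan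
theorem tlB_char (n : Int) (j : Nat) (lines : List String) :
    ∀ (i : Nat) (load base k : Int),
      pvFin n (tlB_colLoop n j i lines (load, base, k)) =
        load + pvSeg n base k + pvColT n (base + k - 1) (pvCol j i lines) := by
  induction lines with
  | nil => intro i load base k; simp [tlB_colLoop, pvFin, pvCol, pvColT, pvColA]
  | cons line rest ih =>
    intro i load base k
    rcases hc : line.toList[j]? with _ | c
    · have hd : line.toList.getD j '.' = '.' := by simp [List.getD_eq_getElem?_getD, hc]
      simp only [tlB_colLoop, pvCol, hc, hd]
      rw [ih, pvColT_cons]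
      simp [pvGain, pvStep]
    · have hd : line.toList.getD j '.' = c := by simp [List.getD_eq_getElem?_getD, hc]
      simp only [tlB_colLoop, pvCol, hc, hd]
      by_cases hO : c = 'O'
      · rw [if_pos hO, ih, hO, pvColT_cons]
        have h1 : base + (k + 1) - 1 = base + k := by ring
        have h2 : pvStep i (base + k - 1) 'O' = base + k := by
          simp only [pvStep, reduceIte]
          ring
        rw [h1, h2, pvSeg_succ]
        have hg : pvGain n (base + k - 1) 'O' = n - (base + k) := by
          simp only [pvGain, reduceIte]
          ring
        rw [hg]
        ring
      · by_cases hH : c = '#'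
        · rw [if_neg hO, if_pos hH, ih, hH, pvColT_cons]
          have h2 : pvStep i (base + k - 1) '#' = (i : Int) := by
            simp [pvStep]
          rw [h2, pvSeg_zero]
          have h3 : (i : Int) + 1 + 0 - 1 = (i : Int) := by ring
          rw [h3]
          simp only [pvGain]
          rw [if_neg (by decide)]
          unfold pvSeg; ring
        · rw [if_neg hO, if_neg hH, ih, pvColT_cons]
          have h2 : pvStep i (base + k - 1) c = base + k - 1 := by simp [pvStep, hO, hH]
          rw [h2]
          simp only [pvGain]
          rw [if_neg hO]
          ring

-- ===== VERDICT (by name: the statements are the Claim_ definitions above) =====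
theorem total_load_spec : Claim_equal_total_load := by
  intro map_lines _ hPre
  obtain ⟨hne, hpre⟩ := hPre
  unfold Spec_total_load total_load total_load_alt
  set w := (map_lines.headD "").length with hw
  have hH : ∀ line ∈ map_lines, ∀ k,
      (List.replicate w (-1 : Int)).length ≤ k → line.toList.getD k '.' ≠ 'O' := by
    intro line hl k hk hO
    rw [List.length_replicate] at hk
    by_cases hklt : k < line.toList.length
    · exact absurd (hpre line hl k hklt (Or.inl hO)) (by omega)
    · rw [List.getD_eq_default _ _ (by omega)] at hO
      exact absurd hO (by decide)
  rw [tlA_char _ _ 0 _ 0 hH]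
  simp only [List.length_replicate, zero_add]
  congr 1
  apply List.map_congr_left
  intro j hj
  have hj' := List.mem_range.mp hj
  rw [List.getD_replicate _ hj']
  unfold tlB_col
  rcases hres : tlB_colLoop (map_lines.length : Int) j 0 map_lines (0, 0, 0) with ⟨load, base, k⟩
  have hch := tlB_char (map_lines.length : Int) j map_lines 0 0 0 0
  rw [hres] at hch
  have hmatch : (match (load, base, k) with
      | (load, base, k) => load + k * (map_lines.length : Int) - k * base -
          PySem.Int.floordiv (k * (k - 1)) 2)
      = load + k * (map_lines.length : Int) - k * base -
          PySem.Int.floordiv (k * (k - 1)) 2 := rfl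
  have hfin : pvFin (map_lines.length : Int) (load, base, k)
      = load + k * (map_lines.length : Int) - k * base -
          PySem.Int.floordiv (k * (k - 1)) 2 := by
    unfold pvFin pvSeg; ring
  rw [hmatch, ← hfin, hch, pvSeg_zero]
  norm_num
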